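-- pv_equiv track=rewrite | github.com/yekatkov/cpprestsdk | cmake/unexport.py | getVariableValue
-- ===== SOURCE A (Python) =====
-- def getVariableValue(varName, lines):
--     result = ''
--     parseLine = False
--     for line in lines:
--         if parseLine:
--             if line.endswith('\\'):
--                 result += line[0:-1]
--             else:
--                 result += line
--                 break
--         elif line.startswith(varName):
--             if not line.endswith('\\'):
--                 return ''
--             parseLine = True
--             continue
--
--     return result
-- ===== SOURCE B (Python) =====
-- def getVariableValue(varName, lines):
--     lines = list(lines)
--     i = next((k for k, l in enumerate(lines) if l.startswith(varName)), None)
--     if i is None or not lines[i].endswith('\\'):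
--         return ''
--     tail = lines[i + 1:]
--     k = next((j for j, l in enumerate(tail) if not l.endswith('\\')), len(tail))
--     return ''.join(l[:-1] for l in tail[:k]) + (tail[k] if k < len(tail) else '')
-- ===== Notes on version B (the rewrite author's own statement) =====
-- stated objective: alternative
-- what changed: Replaced A's stateful single scan (boolean flag + growing accumulator) by a staged index-based pipeline: find the start index with next/enumerate, slice off the tail, find the first non-continuation index, and build the result with one ''.join over the sliced prefix plus the terminator line.
import Mathlib
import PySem

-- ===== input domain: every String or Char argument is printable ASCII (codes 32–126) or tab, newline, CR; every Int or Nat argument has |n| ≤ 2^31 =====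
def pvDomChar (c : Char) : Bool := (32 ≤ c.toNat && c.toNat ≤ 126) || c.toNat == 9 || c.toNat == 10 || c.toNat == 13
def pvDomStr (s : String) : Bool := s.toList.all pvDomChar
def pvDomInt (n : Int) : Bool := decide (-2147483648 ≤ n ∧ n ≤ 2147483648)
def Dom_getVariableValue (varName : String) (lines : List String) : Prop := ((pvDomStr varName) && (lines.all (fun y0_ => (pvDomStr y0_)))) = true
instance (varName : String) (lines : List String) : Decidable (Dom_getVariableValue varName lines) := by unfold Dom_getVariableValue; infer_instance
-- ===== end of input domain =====

-- B replaces A's single stateful scan (flag + accumulator) by an index-based pipeline: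
-- find the start index with findIdx?, split off the tail, find the first non-continuation
-- index, then join the slices — same result, a staged declarative decomposition.

-- ===== PORT A =====
-- single loop with accumulator `result` and flag `parseLine`, exactly A's branches
def pvGoA (varName : String) (result : String) (parseLine : Bool) : List String → String
  | [] => result
  | line :: rest =>
    if parseLine then
      if PySem.Str.endswith line "\\" then
        pvGoA varName (result ++ PySem.Str.slice line (some 0) (some (-1))) true rest
      else
        result ++ line        -- break
    else if PySem.Str.startswith line varName then
      if !(PySem.Str.endswith line "\\") then ""   -- return ''
      else pvGoA varName result true rest          -- continue
    else pvGoA varName result parseLine rest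

def getVariableValue (varName : String) (lines : List String) : String :=
  pvGoA varName "" false lines

-- ===== PORT B =====
-- Source B: i = first index with startswith; tail = lines[i+1:]; k = first index in tail not
-- ending in '\' (default len(tail)); ''.join of sliced prefix plus the terminator if any.
-- (lines[i] with 0 ≤ i < len is List.getD; lines[i+1:] with i+1 ≥ 0 is List.drop.)
def getVariableValue_alt (varName : String) (lines : List String) : String :=
  match lines.findIdx? (fun l => PySem.Str.startswith l varName) with
  | none => ""
  | some i =>
    if !(PySem.Str.endswith (lines.getD i "") "\\") then ""
    else
      let tail := lines.drop (i + 1)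
      let k := (tail.findIdx? (fun l => !(PySem.Str.endswith l "\\"))).getD tail.length
      PySem.Str.join "" ((tail.take k).map (fun l => PySem.Str.slice l none (some (-1)))) ++
        (if k < tail.length then tail.getD k "" else "")

-- ===== PRECONDITION & SPEC =====
def Spec_getVariableValue (varName : String) (lines : List String) (out : String) : Prop := out = getVariableValue_alt varName lines
instance (varName : String) (lines : List String) (out : String) : Decidable (Spec_getVariableValue varName lines out) := by unfold Spec_getVariableValue; infer_instance

-- ===== CLAIM (what is proved, stated in full; the proofs are below) =====
def Claim_equal_getVariableValue : Prop := ∀ (varName : String) (lines : List String), Dom_getVariableValue varName lines → Spec_getVariableValue varName lines (getVariableValue varName lines)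

-- ===== LEMMAS AND PROOFS =====

-- B's tail expression (the let-block of getVariableValue_alt), named for the proofs below
def pvTailVal (tail : List String) : String :=
  let k := (tail.findIdx? (fun l => !(PySem.Str.endswith l "\\"))).getD tail.length
  PySem.Str.join "" ((tail.take k).map (fun l => PySem.Str.slice l none (some (-1)))) ++
    (if k < tail.length then tail.getD k "" else "")

theorem pvJoinEmpty_cons (x : String) (xs : List String) :
    PySem.Str.join "" (x :: xs) = x ++ PySem.Str.join "" xs := by
  have h : (PySem.Str.join "" (x :: xs)).toList = (x ++ PySem.Str.join "" xs).toList := by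
    simp only [PySem.Str.toList_join, String.toList_append]
    cases xs with
    | nil => simp [PySem.Chars.join, List.intercalate]
    | cons y ys =>
      simp only [List.map_cons]
      rw [PySem.Chars.join_cons_cons]
      simp
  exact String.toList_injective h

theorem pvTailVal_nil : pvTailVal [] = "" := by
  simp [pvTailVal, PySem.Str.join, PySem.Chars.join, List.intercalate]

theorem pvTailVal_cons_stop (l : String) (rest : List String)
    (h : PySem.Str.endswith l "\\" = false) :
    pvTailVal (l :: rest) = l := by
  have h' : PySem.Chars.endswith l.toList ['\\'] = false := by simpa using h
  simp [pvTailVal, List.findIdx?_cons, h', PySem.Str.join, PySem.Chars.join, List.intercalate]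

theorem pvTailVal_cons_end (l : String) (rest : List String)
    (h : PySem.Str.endswith l "\\" = true) :
    pvTailVal (l :: rest) = PySem.Str.slice l none (some (-1)) ++ pvTailVal rest := by
  have h' : PySem.Chars.endswith l.toList ['\\'] = true := by simpa using h
  simp only [pvTailVal]
  cases hf : rest.findIdx? (fun l => !(PySem.Chars.endswith l.toList ['\\'])) with
  | none =>
      simp [List.findIdx?_cons, h', hf, pvJoinEmpty_cons]
  | some k =>
      have hk : k < rest.length := (List.findIdx?_eq_some_iff_findIdx_eq.mp hf).1
      simp [List.findIdx?_cons, h', hf, pvJoinEmpty_cons, String.append_assoc, hk]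

-- A slices line[0:-1], B line[:-1]: the same string
theorem pvStrSliceZero (l : String) :
    PySem.Str.slice l (some 0) (some (-1)) = PySem.Str.slice l none (some (-1)) := by
  simp [PySem.Str.slice]

-- getVariableValue_alt unfolded one line at a time (its three cons-cases)
theorem pvAlt_cons_start_end (varName l : String) (rest : List String)
    (hs : PySem.Chars.startswith l.toList varName.toList = true)
    (he : PySem.Chars.endswith l.toList ['\\'] = true) :
    getVariableValue_alt varName (l :: rest) = pvTailVal rest := by
  simp [getVariableValue_alt, pvTailVal, List.findIdx?_cons, hs, he, List.map_take]

theorem pvAlt_cons_start_stop (varName l : String) (rest : List String)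
    (hs : PySem.Chars.startswith l.toList varName.toList = true)
    (he : PySem.Chars.endswith l.toList ['\\'] = false) :
    getVariableValue_alt varName (l :: rest) = "" := by
  simp [getVariableValue_alt, List.findIdx?_cons, hs, he]

theorem pvAlt_cons_notstart (varName l : String) (rest : List String)
    (hs : PySem.Chars.startswith l.toList varName.toList = false) :
    getVariableValue_alt varName (l :: rest) = getVariableValue_alt varName rest := by
  simp only [getVariableValue_alt, List.findIdx?_cons]
  cases rest.findIdx? (fun x => PySem.Str.startswith x varName) with
  | none => simp [hs]
  | some i => simp [hs, List.map_take, List.drop_succ_cons]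

-- once A's flag is set, its loop computes result ++ B's tail value
theorem pvGoA_true (varName result : String) (ls : List String) :
    pvGoA varName result true ls = result ++ pvTailVal ls := by
  induction ls generalizing result with
  | nil => simp [pvGoA, pvTailVal_nil]
  | cons l rest ih =>
    by_cases h : PySem.Str.endswith l "\\" = true
    · have hC : PySem.Chars.endswith l.toList ['\\'] = true := by simpa using h
      simp [pvGoA, hC, ih, pvTailVal_cons_end l rest h, pvStrSliceZero, String.append_assoc]
    · have h' := eq_false_of_ne_true h
      have hC : PySem.Chars.endswith l.toList ['\\'] = false := by simpa using h'
      simp [pvGoA, hC, pvTailVal_cons_stop l rest h']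

-- before the flag is set, A's loop equals B's staged pipeline
theorem pvGoA_false (varName : String) (ls : List String) :
    pvGoA varName "" false ls = getVariableValue_alt varName ls := by
  induction ls with
  | nil => rfl
  | cons l rest ih =>
    by_cases hs : PySem.Chars.startswith l.toList varName.toList = true
    · by_cases he : PySem.Chars.endswith l.toList ['\\'] = true
      · rw [pvAlt_cons_start_end varName l rest hs he]
        have hstep : pvGoA varName "" false (l :: rest) = pvGoA varName "" true rest := by
          simp [pvGoA, hs, he]
        rw [hstep, pvGoA_true]
        simp
      · have he' := eq_false_of_ne_true he
        rw [pvAlt_cons_start_stop varName l rest hs he']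
        simp [pvGoA, hs, he']
    · have hs' := eq_false_of_ne_true hs
      rw [pvAlt_cons_notstart varName l rest hs', ← ih]
      simp [pvGoA, hs']

-- ===== VERDICT (by name: the statement is the Claim_ definition above) =====
theorem getVariableValue_spec : Claim_equal_getVariableValue := by
  intro varName lines _
  unfold Spec_getVariableValue getVariableValue
  exact pvGoA_false varName lines
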